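-- pv_equiv track=rewrite | github.com/Lock1/tbdaspro | package/base.py | stringConfigToArray
-- ===== SOURCE A (Python) =====
-- def stringConfigToArray(str1,maxCount):
--     array = ["" for i in range(maxCount)]
--     indexArray = [0 for i in range(2*maxCount)]
--     counter = 0
--     for i in range(200): # 200 bisa di konfig
--         try:
--             if (str1[i] == "\""):
--                 if (counter % 2):
--                     indexArray[counter] = i
--                 else:
--                     indexArray[counter] = i + 1
--                 counter += 1
--         except IndexError:
--             break
--     for i in range(maxCount):
--          array[i] = str1[indexArray[2*i]:indexArray[2*i+1]]
--     return array
-- ===== SOURCE B (Python) =====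
-- def stringConfigToArray(str1, maxCount):
--     # single pass over the first 200 chars with an open-buffer state machine,
--     # then pad/truncate to maxCount entries
--     matches = []
--     buf = None  # None = outside quotes, else the content accumulated so far
--     for ch in str1[:200]:
--         if ch == '"':
--             if buf is None:
--                 buf = ""
--             else:
--                 matches.append(buf)
--                 buf = None
--         elif buf is not None:
--             buf += ch
--     del matches[max(maxCount, 0):]
--     return matches + [""] * (maxCount - len(matches))
-- ===== Notes on version B (the rewrite author's own statement) =====
-- stated objective: simpler
-- what changed: A records quote indices in a fixed 2*maxCount index array under try/except and then re-slices the string per pair; B makes a single state-machine pass over str1[:200] collecting the quoted substrings directly, then truncates/pads to maxCount entries.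
import Mathlib
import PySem

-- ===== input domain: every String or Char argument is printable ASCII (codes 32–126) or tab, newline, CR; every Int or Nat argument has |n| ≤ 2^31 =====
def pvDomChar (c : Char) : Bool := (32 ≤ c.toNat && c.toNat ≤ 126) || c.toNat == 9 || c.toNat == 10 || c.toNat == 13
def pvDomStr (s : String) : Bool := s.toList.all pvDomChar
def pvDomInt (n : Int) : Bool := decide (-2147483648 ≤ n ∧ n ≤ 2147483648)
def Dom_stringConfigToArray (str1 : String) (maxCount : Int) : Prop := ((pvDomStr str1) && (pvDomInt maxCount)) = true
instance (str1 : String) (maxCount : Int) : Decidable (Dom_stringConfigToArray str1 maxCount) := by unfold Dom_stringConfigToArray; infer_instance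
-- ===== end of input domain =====

-- B replaces A's index bookkeeping (a 2*maxCount index array filled under try/except,
-- then a slicing pass) by a single state-machine pass that accumulates the quoted
-- substrings directly; objective: simpler.

-- ===== PORT A =====
-- 'for i in range(200): try: … except IndexError: break' — returns early ("break")
-- exactly where str1[i] or indexArray[counter] would raise IndexError (the 'none' cases).
def stringConfigToArrayLoop (cs : List Char) : List Int → List Int → Int → List Int
  | [], ia, _ => ia
  | i :: rest, ia, counter =>
    match PySem.List.pyGet? cs i with
    | none => ia                                   -- str1[i] IndexError → break
    | some c =>
      if c = '"' then
        match PySem.List.pySet? ia counter (if PySem.Int.mod counter 2 ≠ 0 then i else i + 1) with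
        | none => ia                               -- indexArray[counter] IndexError → break
        | some ia' => stringConfigToArrayLoop cs rest ia' (counter + 1)
      else stringConfigToArrayLoop cs rest ia counter

def stringConfigToArray (str1 : String) (maxCount : Int) : List String :=
  let cs := str1.toList
  let array : List String := (PySem.List.pyRange 0 maxCount 1).map (fun _ => "")
  let indexArray : List Int := (PySem.List.pyRange 0 (2 * maxCount) 1).map (fun _ => (0 : Int))
  let ia := stringConfigToArrayLoop cs (PySem.List.pyRange 0 200 1) indexArray 0
  (PySem.List.pyRange 0 maxCount 1).foldl
    (fun arr i =>
      PySem.List.pySetD arr i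
        (String.ofList (PySem.List.slice cs (some (PySem.List.pyGetD ia (2 * i) 0))
                                        (some (PySem.List.pyGetD ia (2 * i + 1) 0)))))
    array

-- ===== PORT B =====
-- one step of the state machine: st.2 = none means "outside quotes", some b = content so far
def altStep (st : List (List Char) × Option (List Char)) (ch : Char) :
    List (List Char) × Option (List Char) :=
  if ch = '"' then
    match st.2 with
    | none => (st.1, some [])
    | some b => (st.1 ++ [b], none)
  else
    match st.2 with
    | none => st
    | some b => (st.1, some (b ++ [ch]))

def stringConfigToArray_alt (str1 : String) (maxCount : Int) : List String :=
  let cs := PySem.List.slice str1.toList none (some 200)      -- str1[:200]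
  let ms := (cs.foldl altStep ([], none)).1
  let ms := ms.take (max maxCount 0).toNat              -- del matches[max(maxCount,0):]
  ms.map String.ofList ++ List.replicate (maxCount - ms.length).toNat ""

-- ===== PRECONDITION & SPEC =====
def Spec_stringConfigToArray (str1 : String) (maxCount : Int) (out : List String) : Prop := out = stringConfigToArray_alt str1 maxCount
instance (str1 : String) (maxCount : Int) (out : List String) : Decidable (Spec_stringConfigToArray str1 maxCount out) := by unfold Spec_stringConfigToArray; infer_instance

-- ===== CLAIM (what is proved, stated in full; the proofs are below) =====
def Claim_equal_stringConfigToArray : Prop := ∀ (str1 : String) (maxCount : Int), Dom_stringConfigToArray str1 maxCount → Spec_stringConfigToArray str1 maxCount (stringConfigToArray str1 maxCount)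

-- ===== LEMMAS AND PROOFS =====

def posOf : List Char → List Int
  | [] => []
  | c :: t => if c = '"' then 0 :: (posOf t).map (· + 1) else (posOf t).map (· + 1)

def fillIA : List Int → Int → List Int → List Int
  | ia, _, [] => ia
  | ia, c, p :: ps =>
    match PySem.List.pySet? ia c (if PySem.Int.mod c 2 ≠ 0 then p else p + 1) with
    | none => ia
    | some ia' => fillIA ia' (c + 1) ps

theorem posOf_map_shift (t : List Int) (a : Int) :
    (t.map (· + 1)).map (· + a) = t.map (· + (a + 1)) := by
  simp only [List.map_map]
  apply List.map_congr_left
  intro x _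
  simp only [Function.comp]
  ring

theorem loop_eq_fillIA (cs : List Char) (aN : Nat) (b : Int) (ia : List Int) (c : Int) :
    stringConfigToArrayLoop cs (PySem.List.pyRange (aN : Int) b 1) ia c =
      fillIA ia c ((posOf ((cs.drop aN).take (b - aN).toNat)).map (· + (aN : Int))) := by
  generalize ht : (b - (aN : Int)).toNat = t
  induction t generalizing aN ia c with
  | zero =>
    have hb : b ≤ (aN : Int) := by omega
    rw [PySem.List.pyRange_one_eq_nil hb]
    simp [stringConfigToArrayLoop, posOf, fillIA]
  | succ t ih =>
    have hab : (aN : Int) < b := by omega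
    rw [PySem.List.pyRange_one_cons hab]
    by_cases hlen : aN < cs.length
    · have hdrop : cs.drop aN = cs[aN] :: cs.drop (aN + 1) := List.drop_eq_getElem_cons hlen
      have hget : PySem.List.pyGet? cs (aN : Int) = some cs[aN] := by
        simp [PySem.List.pyGet?_natCast, List.getElem?_eq_getElem hlen]
      have htake : (cs.drop aN).take (t + 1) = cs[aN] :: (cs.drop (aN + 1)).take t := by
        rw [hdrop, List.take_succ_cons]
      have hnext : ((aN : Int) + 1) = (((aN + 1 : Nat)) : Int) := by push_cast; ring
      have ht' : (b - ((aN + 1 : Nat) : Int)).toNat = t := by push_cast; omega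
      rw [htake]
      by_cases hq : cs[aN] = '"'
      · simp only [stringConfigToArrayLoop, hget]
        rw [if_pos hq]
        simp only [posOf]
        rw [if_pos hq, List.map_cons, posOf_map_shift]
        simp only [fillIA, zero_add]
        cases hset : PySem.List.pySet? ia c (if PySem.Int.mod c 2 ≠ 0 then (aN : Int) else (aN : Int) + 1) with
        | none => rfl
        | some ia' =>
          have := ih (aN + 1) ia' (c + 1) ht'
          rw [← hnext] at this
          exact this
      · simp only [stringConfigToArrayLoop, hget, if_neg hq]
        simp only [posOf, if_neg hq, posOf_map_shift]
        have := ih (aN + 1) ia c ht'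
        rw [← hnext] at this
        exact this
    · have hle : cs.length ≤ aN := Nat.le_of_not_lt hlen
      have hget : PySem.List.pyGet? cs (aN : Int) = none := by
        simp [PySem.List.pyGet?_natCast, List.getElem?_eq_none_iff.mpr hle]
      have hdrop : cs.drop aN = [] := List.drop_eq_nil_of_le hle
      simp [stringConfigToArrayLoop, hget, hdrop, posOf, fillIA]

theorem fillIA_getD (qs : List Int) (ia : List Int) (k j : Nat) :
    (fillIA ia (k : Int) qs).getD j 0 =
      if k ≤ j ∧ j < min (k + qs.length) ia.length then
        (if j % 2 = 0 then qs.getD (j - k) 0 + 1 else qs.getD (j - k) 0)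
      else ia.getD j 0 := by
  induction qs generalizing ia k j with
  | nil =>
    simp only [fillIA, List.length_nil, Nat.add_zero]
    rw [if_neg (by omega)]
  | cons p ps ih =>
    simp only [fillIA]
    by_cases hk : k < ia.length
    · have hset : PySem.List.pySet? ia (k : Int) (if PySem.Int.mod (k : Int) 2 ≠ 0 then p else p + 1)
          = some (ia.set k (if PySem.Int.mod (k : Int) 2 ≠ 0 then p else p + 1)) :=
        PySem.List.pySet?_natCast ia k _ hk
      rw [hset]
      have hk1 : ((k : Int) + 1) = ((k + 1 : Nat) : Int) := by push_cast; ring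
      rw [hk1, ih]
      have hmod : PySem.Int.mod (k : Int) 2 = ((k % 2 : Nat) : Int) := PySem.Int.mod_natCast k 2
      have hlen : (ia.set k (if PySem.Int.mod (k : Int) 2 ≠ 0 then p else p + 1)).length = ia.length := by
        simp
      rcases Nat.lt_trichotomy j k with hj | hj | hj
      · have hA : ¬ ((k + 1) ≤ j ∧ j < min ((k + 1) + ps.length)
            (ia.set k (if PySem.Int.mod (k : Int) 2 ≠ 0 then p else p + 1)).length) := by omega
        have hB : ¬ (k ≤ j ∧ j < min (k + (p :: ps).length) ia.length) := by omega
        rw [if_neg hA, if_neg hB]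
        simp only [List.getD_eq_getElem?_getD]
        rw [List.getElem?_set_ne (by omega)]
      · subst hj
        have hA : ¬ ((j + 1) ≤ j ∧ j < min ((j + 1) + ps.length)
            (ia.set j (if PySem.Int.mod (j : Int) 2 ≠ 0 then p else p + 1)).length) := by omega
        have hB : (j ≤ j ∧ j < min (j + (p :: ps).length) ia.length) := by
          simp only [List.length_cons]; omega
        rw [if_neg hA, if_pos hB]
        simp only [List.getD_eq_getElem?_getD]
        rw [List.getElem?_set_self (by omega)]
        simp only [Option.getD_some, Nat.sub_self]
        by_cases hpar : j % 2 = 0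
        · rw [if_pos hpar, if_neg (show ¬ PySem.Int.mod (j : Int) 2 ≠ 0 by rw [hmod]; omega)]
          simp
        · rw [if_neg hpar, if_pos (show PySem.Int.mod (j : Int) 2 ≠ 0 by rw [hmod]; omega)]
          simp
      · have hsub : j - k = (j - (k + 1)) + 1 := by omega
        by_cases hin : j < min (k + 1 + ps.length) ia.length
        · have hA : ((k + 1) ≤ j ∧ j < min ((k + 1) + ps.length)
              (ia.set k (if PySem.Int.mod (k : Int) 2 ≠ 0 then p else p + 1)).length) := by
            rw [hlen]; omega
          have hB : (k ≤ j ∧ j < min (k + (p :: ps).length) ia.length) := by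
            simp only [List.length_cons]; omega
          rw [if_pos hA, if_pos hB, hsub]
          simp only [List.getD_cons_succ]
        · have hA : ¬ ((k + 1) ≤ j ∧ j < min ((k + 1) + ps.length)
              (ia.set k (if PySem.Int.mod (k : Int) 2 ≠ 0 then p else p + 1)).length) := by
            rw [hlen]; omega
          have hB : ¬ (k ≤ j ∧ j < min (k + (p :: ps).length) ia.length) := by
            simp only [List.length_cons]; omega
          rw [if_neg hA, if_neg hB]
          simp only [List.getD_eq_getElem?_getD]
          rw [List.getElem?_set_ne (by omega)]
    · have hset : PySem.List.pySet? ia (k : Int) (if PySem.Int.mod (k : Int) 2 ≠ 0 then p else p + 1) = none := by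
        rw [PySem.List.pySet?_eq_none_iff]
        simp only [PySem.Raise.InRange, not_and, not_lt]
        intro
        omega
      rw [hset]
      have hB : ¬ (k ≤ j ∧ j < min (k + (p :: ps).length) ia.length) := by omega
      rw [if_neg hB]

-- accumulator of matched segments only grows; split it off
theorem machine_append (l : List Char) (ms : List (List Char)) (b : Option (List Char)) :
    l.foldl altStep (ms, b) =
      (ms ++ (l.foldl altStep ([], b)).1, (l.foldl altStep ([], b)).2) := by
  induction l generalizing ms b with
  | nil => simp
  | cons c l ih =>
    have hstep : altStep (ms, b) c = (ms ++ (altStep ([], b) c).1, (altStep ([], b) c).2) := by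
      by_cases hc : c = '"' <;> cases b <;> simp [altStep, hc]
    simp only [List.foldl_cons, hstep]
    rw [ih (ms ++ (altStep ([], b) c).1) (altStep ([], b) c).2]
    conv_rhs => rw [← Prod.mk.eta (p := altStep ([], b) c),
      ih (altStep ([], b) c).1 (altStep ([], b) c).2]
    simp [List.append_assoc]

theorem machine_accum (u : List Char) (h : '"' ∉ u) (ms : List (List Char)) (b : List Char) :
    u.foldl altStep (ms, some b) = (ms, some (b ++ u)) := by
  induction u generalizing b with
  | nil => simp
  | cons c t ih =>
    have hc : c ≠ '"' := by intro hc; exact h (by simp [hc])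
    simp only [List.foldl_cons, altStep, if_neg hc]
    rw [ih (by intro hm; exact h (by simp [hm])) (b ++ [c])]
    simp

theorem posOf_no_quote (u : List Char) (h : '"' ∉ u) : posOf u = [] := by
  induction u with
  | nil => rfl
  | cons c t ih =>
    have hc : c ≠ '"' := by intro hc; exact h (by simp [hc])
    simp only [posOf, if_neg hc]
    rw [ih (by intro hm; exact h (by simp [hm]))]
    simp

theorem posOf_append_quote (u v : List Char) (h : '"' ∉ u) :
    posOf (u ++ '"' :: v) = ((u.length : Int)) :: (posOf v).map (· + ((u.length : Int) + 1)) := by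
  induction u with
  | nil =>
    simp only [List.nil_append, posOf, if_pos rfl, List.length_nil]
    norm_num
  | cons c t ih =>
    have hc : c ≠ '"' := by intro hc; exact h (by simp [hc])
    simp only [List.cons_append, posOf, if_neg hc]
    rw [ih (by intro hm; exact h (by simp [hm]))]
    simp only [List.map_cons, List.map_map, List.length_cons]
    have h1 : (((t.length + 1 : Nat)) : Int) = (t.length : Int) + 1 := by push_cast; ring
    rw [h1]
    congr 1
    apply List.map_congr_left
    intro y _
    simp only [Function.comp]
    ring

theorem posOf_nonneg (l : List Char) : ∀ p ∈ posOf l, 0 ≤ p := by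
  induction l with
  | nil => simp [posOf]
  | cons c t ih =>
    intro p hp
    by_cases hc : c = '"' <;> simp only [posOf, hc, if_true, if_false, List.mem_cons,
      List.mem_map, ite_true, ite_false] at hp
    · rcases hp with hp | hp
      · omega
      · obtain ⟨q, hq, rfl⟩ := hp
        have := ih q hq
        omega
    · obtain ⟨q, hq, rfl⟩ := hp
      have := ih q hq
      omega

theorem dropWhile_quote_head : ∀ (r : List Char) (c : Char) (x : List Char),
    r.dropWhile (· ≠ '"') = c :: x → c = '"'
  | [], c, x, h => by simp at h
  | a :: t, c, x, h => by
    by_cases ha : a = '"'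
    · rw [List.dropWhile_cons, if_neg (by simp [ha])] at h
      rw [← ha]
      exact (List.cons.injEq a t c x ▸ h).1.symm ▸ rfl
    · rw [List.dropWhile_cons, if_pos (by simp [ha])] at h
      exact dropWhile_quote_head t c x h

theorem slice_shift (pre x : List Char) (a b : Int) (ha : 0 ≤ a) (hb : 0 ≤ b) :
    PySem.List.slice (pre ++ x) (some ((pre.length : Int) + a)) (some ((pre.length : Int) + b)) =
      PySem.List.slice x (some a) (some b) := by
  rw [PySem.List.slice_toNat _ (by omega) (by omega), PySem.List.slice_toNat _ ha hb]
  have h1 : ((pre.length : Int) + a).toNat = pre.length + a.toNat := by omega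
  have h2 : ((pre.length : Int) + b).toNat = pre.length + b.toNat := by omega
  rw [h1, h2, List.drop_length_add_append]
  congr 1
  omega

theorem getD_map_add (P : List Int) (off : Int) (i : Nat) (h : i < P.length) :
    ((P.map (· + off)).getD i 0) = P[i] + off := by
  simp [List.getD_eq_getElem?_getD, List.getElem?_map, List.getElem?_eq_getElem h]

theorem getD_eq_getElem' (P : List Int) (i : Nat) (h : i < P.length) :
    P.getD i 0 = P[i] := by
  simp [List.getD_eq_getElem?_getD, List.getElem?_eq_getElem h]

theorem machine_matches (l : List Char) :
    ((l.foldl altStep ([], none)).1 : List (List Char)) =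
      (List.range ((posOf l).length / 2)).map
        (fun k => PySem.List.slice l (some ((posOf l).getD (2 * k) 0 + 1))
                                     (some ((posOf l).getD (2 * k + 1) 0))) := by
  generalize hn : l.length = n
  induction n using Nat.strong_induction_on generalizing l with
  | _ n ih =>
    match l, hn with
    | [], hn => simp [posOf]
    | c :: r, hn =>
      by_cases hc : c = '"'
      · subst hc
        cases he : r.dropWhile (· ≠ '"') with
        | nil =>
          have hwr : r.takeWhile (· ≠ '"') = r := by
            have := List.takeWhile_append_dropWhile (p := (· ≠ '"')) (l := r)
            rw [he, List.append_nil] at this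
            exact this
          have hr : '"' ∉ r := by
            intro hm
            have := List.mem_takeWhile_imp (hwr ▸ hm)
            simp at this
          simp only [List.foldl_cons]
          have hstep : altStep ([], none) '"' = ([], some []) := by simp [altStep]
          rw [hstep, machine_accum r hr]
          simp only [posOf, if_pos rfl, posOf_no_quote r hr]
          simp
        | cons c2 x =>
          have hc2 : c2 = '"' := dropWhile_quote_head r c2 x he
          subst hc2
          have hr : r = r.takeWhile (· ≠ '"') ++ '"' :: x := by
            conv_lhs => rw [← List.takeWhile_append_dropWhile (p := (· ≠ '"')) (l := r)]
            rw [he]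
          set w := r.takeWhile (· ≠ '"') with hw
          have hwq : '"' ∉ w := by
            intro hm
            have := List.mem_takeWhile_imp hm
            simp at this
          -- machine side
          have hstep1 : altStep ([], none) '"' = ([], some []) := by simp [altStep]
          have hstep2 : altStep ([], some w) '"' = ([w], none) := by simp [altStep]
          have hmach : (((('"' : Char) :: r).foldl altStep ([], none)).1 : List (List Char))
              = [w] ++ (x.foldl altStep ([], none)).1 := by
            rw [List.foldl_cons, hstep1, hr, List.foldl_append, machine_accum w hwq,
              List.nil_append, List.foldl_cons, hstep2, machine_append]
          have hlx : x.length < n := by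
            have h1 : r.length + 1 = n := by simpa using hn
            have h2 : r.length = w.length + 1 + x.length := by rw [hr]; simp; omega
            omega
          rw [hmach, ih x.length hlx x rfl]
          have hpr : posOf r = (w.length : Int) :: (posOf x).map (· + ((w.length : Int) + 1)) := by
            conv_lhs => rw [hr]
            exact posOf_append_quote w x hwq
          have hposl : posOf ('"' :: r)
              = 0 :: ((w.length : Int) + 1) :: (posOf x).map (· + ((w.length : Int) + 2)) := by
            have e1 : posOf ('"' :: r) = 0 :: (posOf r).map (· + 1) := by simp [posOf]
            rw [e1, hpr, List.map_cons, List.map_map]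
            congr 2
            apply List.map_congr_left
            intro y _
            simp only [Function.comp]
            ring
          rw [hposl]
          simp only [List.length_cons, List.length_map]
          have hdiv : ((posOf x).length + 1 + 1) / 2 = (posOf x).length / 2 + 1 := by omega
          rw [hdiv, List.range_succ_eq_map, List.map_cons, List.map_map]
          simp only [List.append_nil, List.singleton_append]
          refine List.cons_eq_cons.mpr ⟨?_, ?_⟩
          · -- the first matched segment is w
            simp only [Nat.mul_zero, Nat.zero_add, List.getD_cons_zero, List.getD_cons_succ,
              zero_add]
            rw [PySem.List.slice_toNat _ (by omega) (by positivity)]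
            have ht2 : ((w.length : Int) + 1).toNat = w.length + 1 := by omega
            rw [show (1 : Int).toNat = 1 from rfl, ht2]
            simp only [List.drop_succ_cons, List.drop_zero, Nat.add_sub_cancel]
            conv_rhs => rw [hr]
            exact (List.take_left (l₂ := '"' :: x)).symm
          · -- the remaining segments live inside x
            apply List.map_congr_left
            intro k hk
            simp only [List.mem_range] at hk
            have h2k : 2 * k < (posOf x).length := by omega
            have h2k1 : 2 * k + 1 < (posOf x).length := by omega
            simp only [Function.comp]
            rw [show 2 * (k + 1) = (2 * k + 1) + 1 from by ring,
              show (2 * k + 1) + 1 + 1 = (2 * k + 1 + 1) + 1 from rfl]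
            simp only [List.getD_cons_succ]
            rw [getD_map_add _ _ _ h2k, getD_map_add _ _ _ h2k1,
              getD_eq_getElem' _ _ h2k, getD_eq_getElem' _ _ h2k1]
            have hnn0 := posOf_nonneg x _ (List.getElem_mem h2k)
            have hnn1 := posOf_nonneg x _ (List.getElem_mem h2k1)
            have hsh := slice_shift ('"' :: w ++ ['"']) x ((posOf x)[2*k] + 1) ((posOf x)[2*k+1])
              (by omega) hnn1
            have hlp : (('"' :: w ++ ['"']).length : Int) = (w.length : Int) + 2 := by
              simp; ring
            rw [hlp] at hsh
            have hl2 : ('"' : Char) :: r = ('"' :: w ++ ['"']) ++ x := by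
              rw [hr]; simp
            rw [hl2]
            rw [show (posOf x)[2*k] + ((w.length : Int) + 2) + 1
                = (w.length : Int) + 2 + ((posOf x)[2*k] + 1) by ring,
              show (posOf x)[2*k+1] + ((w.length : Int) + 2)
                = (w.length : Int) + 2 + (posOf x)[2*k+1] by ring]
            rw [hsh]
      · -- head is not a quote: skip it
        have hstep : altStep ([], none) c = ([], none) := by simp [altStep, hc]
        rw [List.foldl_cons, hstep]
        have hlen : r.length < n := by simp only [List.length_cons] at hn; omega
        rw [ih r.length hlen r rfl]
        simp only [posOf, if_neg hc, List.length_map]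
        apply List.map_congr_left
        intro k hk
        simp only [List.mem_range] at hk
        have h2k : 2 * k < (posOf r).length := by omega
        have h2k1 : 2 * k + 1 < (posOf r).length := by omega
        rw [getD_map_add _ _ _ h2k, getD_map_add _ _ _ h2k1,
          getD_eq_getElem' _ _ h2k, getD_eq_getElem' _ _ h2k1]
        have hnn0 := posOf_nonneg r _ (List.getElem_mem h2k)
        have hnn1 := posOf_nonneg r _ (List.getElem_mem h2k1)
        have hsh := slice_shift [c] r ((posOf r)[2*k] + 1) ((posOf r)[2*k+1]) (by omega) hnn1
        simp only [List.length_cons, List.length_nil, List.singleton_append, Nat.cast_one] at hsh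
        rw [← hsh]
        congr 1 <;> [skip; congr 1] <;> push_cast <;> ring_nf

theorem posOf_lt_length (l : List Char) : ∀ p ∈ posOf l, p < (l.length : Int) := by
  induction l with
  | nil => simp [posOf]
  | cons c t ih =>
    intro p hp
    by_cases hc : c = '"' <;> simp only [posOf, hc, List.mem_cons, List.mem_map, ite_true,
      ite_false] at hp
    · rcases hp with hp | hp
      · simp [hp]
      · obtain ⟨q, hq, rfl⟩ := hp
        have := ih q hq
        simp only [List.length_cons]
        push_cast
        omega
    · obtain ⟨q, hq, rfl⟩ := hp
      have := ih q hq
      simp only [List.length_cons]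
      push_cast
      omega

-- a slice that stays inside the first n elements ignores truncation to n
theorem slice_take (cs : List Char) (n : Nat) (a b : Int) (ha : 0 ≤ a) (hb0 : 0 ≤ b)
    (hb : b ≤ (n : Int)) :
    PySem.List.slice cs (some a) (some b) = PySem.List.slice (cs.take n) (some a) (some b) := by
  rw [PySem.List.slice_toNat _ ha hb0, PySem.List.slice_toNat _ ha hb0]
  rw [List.drop_take]
  rw [List.take_take]
  congr 1
  omega

theorem foldl_pySetD_range (g : Int → String) (n : Nat) (arr : List String) (h : n ≤ arr.length) :
    (PySem.List.pyRange 0 (n : Int) 1).foldl (fun a i => PySem.List.pySetD a i (g i)) arr =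
      (List.range n).map (fun k : Nat => g (k : Int)) ++ arr.drop n := by
  induction n with
  | zero => simp [PySem.List.pyRange_one_eq_nil]
  | succ n ih =>
    have h1 : ((n+1 : Nat) : Int) = (n : Int) + 1 := by push_cast; ring
    rw [h1, PySem.List.pyRange_one_succ_right (by positivity), List.foldl_append]
    rw [ih (by omega)]
    simp only [List.foldl_cons, List.foldl_nil, PySem.List.pySetD_natCast]
    rw [List.set_append]
    have hlen : ((List.range n).map (fun k : Nat => g (k : Int))).length = n := by simp
    rw [hlen]
    simp only [lt_irrefl, if_false, Nat.sub_self]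
    rw [List.drop_eq_getElem_cons (by omega : n < arr.length)]
    simp [List.range_succ]
    rw [List.drop_eq_getElem_cons (by omega : n < arr.length), List.set_cons_zero]

-- ===== VERDICT (by name: the statement is the Claim_ definition above) =====
theorem stringConfigToArray_spec : Claim_equal_stringConfigToArray := by
  intro str1 mc _hdom
  unfold Spec_stringConfigToArray
  simp only [stringConfigToArray, stringConfigToArray_alt]
  set cs := str1.toList with hcs
  have hslice200 : PySem.List.slice cs none (some 200) = cs.take 200 := by
    rw [PySem.List.slice_to]
    · congr 1
    · norm_num
  by_cases hmc : mc ≤ 0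
  · -- maxCount ≤ 0 : both sides are []
    rw [PySem.List.pyRange_one_eq_nil hmc, PySem.List.pyRange_one_eq_nil (by omega : 2*mc ≤ 0)]
    simp only [List.map_nil, List.foldl_nil]
    rw [show max mc 0 = 0 from by omega]
    simp only [Int.toNat_zero, List.take_nil, List.take_zero, List.map_nil, List.length_nil,
      List.nil_append]
    rw [show ((mc - (0:Nat)).toNat) = 0 from by omega]
    simp
  · push_neg at hmc
    have hm : ((mc.toNat : Nat) : Int) = mc := Int.toNat_of_nonneg (by omega)
    set m := mc.toNat with hmdef
    set Q := posOf (cs.take 200) with hQ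
    -- initial arrays of the A side
    have harr : (PySem.List.pyRange 0 mc 1).map (fun _ => ("" : String)) = List.replicate m "" := by
      rw [List.map_const']
      congr 1
      rw [PySem.List.length_pyRange_one]
      omega
    have hia0 : (PySem.List.pyRange 0 (2*mc) 1).map (fun _ => (0:Int)) = List.replicate (2*m) 0 := by
      rw [List.map_const']
      congr 1
      rw [PySem.List.length_pyRange_one]
      omega
    rw [harr, hia0]
    -- the scanning loop of A computes fillIA on the quote positions
    have hloop : stringConfigToArrayLoop cs (PySem.List.pyRange 0 200 1) (List.replicate (2*m) 0) 0
        = fillIA (List.replicate (2*m) 0) (0 : Int) Q := by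
      have h := loop_eq_fillIA cs 0 200 (List.replicate (2*m) 0) 0
      simp only [Nat.cast_zero, List.drop_zero, add_zero] at h
      rw [show ((200:Int) - 0).toNat = 200 from by omega] at h
      simpa [hQ] using h
    rw [hloop]
    set IA := fillIA (List.replicate (2*m) 0) (0 : Int) Q with hIA
    -- the writing loop of A is a map over range m
    rw [show mc = ((m:Nat):Int) from hm.symm,
      foldl_pySetD_range _ m (List.replicate m "") (by simp)]
    simp only [List.drop_replicate, Nat.sub_self, List.replicate_zero, List.append_nil]
    -- the B side
    rw [hslice200, machine_matches, ← hQ]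
    rw [show max ((m:Nat):Int) 0 = ((m:Nat):Int) from by omega, Int.toNat_natCast]
    rw [← List.map_take, List.take_range]
    set q2 := Q.length / 2 with hq2
    clear_value q2
    simp only [List.map_map, List.length_map, List.length_range]
    rw [show ((((m:Nat)):Int) - ((min m q2 : Nat):Int)).toNat = m - min m q2 from by omega]
    -- elementwise comparison
    apply List.ext_getElem
    · simp
    intro k hk1 hk2
    simp only [List.length_map, List.length_range] at hk1
    rw [List.getElem_map, List.getElem_range]
    have hE : ∀ j : Nat, IA.getD j 0 =
        if j < min Q.length (2*m) then
          (if j % 2 = 0 then Q.getD j 0 + 1 else Q.getD j 0) else 0 := by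
      intro j
      have h0 := fillIA_getD Q (List.replicate (2*m) 0) 0 j
      simp only [Nat.cast_zero, Nat.zero_le, true_and, Nat.zero_add, Nat.sub_zero, zero_add,
        List.length_replicate] at h0
      rw [hIA, h0]
      split_ifs <;> simp [List.getD_replicate]
    have hEv : PySem.List.pyGetD IA (2*(k:Int)) 0 =
        (if 2*k < min Q.length (2*m) then Q.getD (2*k) 0 + 1 else 0) := by
      rw [show (2*(k:Int)) = (((2*k : Nat)):Int) from by push_cast; ring,
        PySem.List.pyGetD_natCast, hE (2*k)]
      simp [Nat.mul_mod_right]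
    have hOd : PySem.List.pyGetD IA (2*(k:Int)+1) 0 =
        (if 2*k+1 < min Q.length (2*m) then Q.getD (2*k+1) 0 else 0) := by
      rw [show (2*(k:Int)+1) = (((2*k+1 : Nat)):Int) from by push_cast; ring,
        PySem.List.pyGetD_natCast, hE (2*k+1)]
      simp [Nat.mul_add_mod]
    rw [hEv, hOd]
    by_cases hin : k < q2
    · -- a fully matched pair: both sides give the same slice
      have h2k : 2*k < Q.length := by omega
      have h2k1 : 2*k+1 < Q.length := by omega
      rw [if_pos (by omega), if_pos (by omega)]
      rw [List.getElem_append_left (by simpa using (by omega : k < min m q2))]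
      simp only [List.getElem_map, List.getElem_range]
      have hnn0 := posOf_nonneg _ _ (List.getElem_mem h2k)
      have hnn1 := posOf_nonneg _ _ (List.getElem_mem h2k1)
      have hlt1 := posOf_lt_length _ _ (List.getElem_mem h2k1)
      rw [getD_eq_getElem' _ _ h2k, getD_eq_getElem' _ _ h2k1]
      rw [slice_take cs 200 (Q[2*k] + 1) (Q[2*k+1]) (by omega) hnn1
        (by
          have : ((cs.take 200).length : Int) ≤ 200 := by
            simp only [List.length_take]
            omega
          omega)]
      simp only [Function.comp_apply]
      rw [getD_eq_getElem' _ _ h2k, getD_eq_getElem' _ _ h2k1]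
    · -- no full pair any more: A slices an empty window, B pads with ""
      have hq : 2*k+1 ≥ Q.length := by omega
      rw [if_neg (show ¬ (2*k+1 < min Q.length (2*m)) from by omega)]
      rw [List.getElem_append_right (by simp; omega)]
      simp only [List.getElem_replicate]
      by_cases hs : 2*k < min Q.length (2*m)
      · rw [if_pos hs]
        have h2k : 2*k < Q.length := by omega
        have hnn0 := posOf_nonneg _ _ (List.getElem_mem h2k)
        rw [getD_eq_getElem' _ _ h2k]
        rw [PySem.List.slice_toNat _ (by omega) le_rfl]
        simp only [Int.toNat_zero, Nat.zero_sub, List.take_zero]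
      · rw [if_neg hs]
        rw [PySem.List.slice_toNat _ le_rfl le_rfl]
        simp only [Int.toNat_zero, Nat.zero_sub, List.take_zero]
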